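-- pv_equiv track=rewrite | github.com/leeminHong1990/PaoDeKuai | kbengine/assets/scripts/base/entitymembers/iPlayerLine.py | getCardByNum
-- ===== SOURCE A (Python) =====
-- def getCardByNum(card2NumDict, cardNum):
-- 	num2CardDict = {}
-- 	for card in card2NumDict:
-- 		if card2NumDict[card] not in num2CardDict:
-- 			num2CardDict[card2NumDict[card]] = []
-- 		num2CardDict[card2NumDict[card]].append(card)
-- 	if cardNum in num2CardDict:
-- 		return sorted(num2CardDict[cardNum])
-- 	return []
-- ===== SOURCE B (Python) =====
-- def getCardByNum(card2NumDict, cardNum):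
--     return sorted(card for card in card2NumDict if card2NumDict[card] == cardNum)
-- ===== Notes on version B (the rewrite author's own statement) =====
-- stated objective: simpler
-- what changed: B drops the inverted num->cards dictionary entirely and returns sorted(filter) in one expression: a single filtering pass over the keys instead of building and then indexing a group-by table.
import Mathlib
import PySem

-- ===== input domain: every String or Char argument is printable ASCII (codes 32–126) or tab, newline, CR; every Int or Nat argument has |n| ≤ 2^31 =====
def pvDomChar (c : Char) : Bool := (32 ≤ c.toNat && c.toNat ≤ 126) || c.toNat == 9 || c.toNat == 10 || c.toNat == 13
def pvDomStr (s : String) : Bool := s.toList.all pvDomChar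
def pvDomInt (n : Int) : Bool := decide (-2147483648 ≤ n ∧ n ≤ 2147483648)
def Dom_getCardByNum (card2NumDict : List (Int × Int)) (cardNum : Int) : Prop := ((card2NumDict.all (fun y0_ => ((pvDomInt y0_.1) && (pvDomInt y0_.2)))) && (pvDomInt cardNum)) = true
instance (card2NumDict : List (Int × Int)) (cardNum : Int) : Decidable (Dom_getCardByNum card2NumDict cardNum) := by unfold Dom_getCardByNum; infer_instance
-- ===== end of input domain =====

-- B returns sorted(card for card in the dict if its count == cardNum) directly, with no inverted
-- num->cards dictionary: a simpler one-pass filter; same return value, no side effects.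


-- ===== PORT A =====
-- A-side helper: one iteration of A's for-loop body (the three statements inside `for card in card2NumDict:`)
def pvLoopA (d : PySem.Dict Int Int) (n2c : PySem.Dict Int (List Int)) (card : Int) : PySem.Dict Int (List Int) :=
  let v := d.getD card 0                -- card2NumDict[card]; card ∈ d.keys, so the lookup never raises
  let n2c' := if n2c.contains v = false then n2c.insert v ([] : List Int) else n2c   -- if v not in num2CardDict: num2CardDict[v] = []
  n2c'.modify v [] (fun cs => cs ++ [card])                                          -- num2CardDict[v].append(card)

def getCardByNum (card2NumDict : List (Int × Int)) (cardNum : Int) : List Int :=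
  let d := PySem.Dict.ofList card2NumDict
  let num2CardDict := d.keys.foldl (pvLoopA d) PySem.Dict.empty
  if num2CardDict.contains cardNum then
    PySem.List.sorted (num2CardDict.getD cardNum []) (fun x => x)
  else []

-- ===== PORT B =====
def getCardByNum_alt (card2NumDict : List (Int × Int)) (cardNum : Int) : List Int :=
  let d := PySem.Dict.ofList card2NumDict
  PySem.List.sorted (d.keys.filter (fun card => d.getD card 0 == cardNum)) (fun x => x)

-- ===== PRECONDITION & SPEC =====
def Spec_getCardByNum (card2NumDict : List (Int × Int)) (cardNum : Int) (out : List Int) : Prop := out = getCardByNum_alt card2NumDict cardNum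
instance (card2NumDict : List (Int × Int)) (cardNum : Int) (out : List Int) : Decidable (Spec_getCardByNum card2NumDict cardNum out) := by unfold Spec_getCardByNum; infer_instance

-- ===== CLAIM (what is proved, stated in full; the proofs are below) =====
def Claim_equal_getCardByNum : Prop := ∀ (card2NumDict : List (Int × Int)) (cardNum : Int), Dom_getCardByNum card2NumDict cardNum → Spec_getCardByNum card2NumDict cardNum (getCardByNum card2NumDict cardNum)

-- ===== LEMMAS AND PROOFS =====
lemma getD_pvLoopA (d : PySem.Dict Int Int) (n2c : PySem.Dict Int (List Int)) (card k : Int) :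
    (pvLoopA d n2c card).getD k [] =
      if d.getD card 0 = k then n2c.getD k [] ++ [card] else n2c.getD k [] := by
  unfold pvLoopA
  by_cases h : n2c.contains (d.getD card 0) = false
  · simp only [h, if_true, PySem.Dict.getD_modify, PySem.Dict.getD_insert]
    by_cases hk : k = d.getD card 0
    · subst hk
      simp [PySem.Dict.getD_of_not_contains n2c [] h]
    · simp [hk, Ne.symm hk]
  · simp only [h, PySem.Dict.getD_modify]
    by_cases hk : k = d.getD card 0
    · subst hk; simp
    · simp [hk, Ne.symm hk]

lemma contains_pvLoopA (d : PySem.Dict Int Int) (n2c : PySem.Dict Int (List Int)) (card k : Int) :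
    (pvLoopA d n2c card).contains k = (k == d.getD card 0 || n2c.contains k) := by
  unfold pvLoopA
  by_cases h : n2c.contains (d.getD card 0) = false
  · simp [h, PySem.Dict.contains_modify, PySem.Dict.contains_insert]
  · simp [h, PySem.Dict.contains_modify]

lemma foldA_getD (d : PySem.Dict Int Int) (ks : List Int) :
    ∀ (n2c : PySem.Dict Int (List Int)) (k : Int),
      (ks.foldl (pvLoopA d) n2c).getD k [] =
        n2c.getD k [] ++ ks.filter (fun c => d.getD c 0 == k) := by
  induction ks with
  | nil => intro n2c k; simp
  | cons c ks ih =>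
      intro n2c k
      simp only [List.foldl_cons, List.filter_cons]
      rw [ih, getD_pvLoopA]
      by_cases h : d.getD c 0 = k <;> simp [h]

lemma foldA_contains (d : PySem.Dict Int Int) (ks : List Int) :
    ∀ (n2c : PySem.Dict Int (List Int)) (k : Int),
      (ks.foldl (pvLoopA d) n2c).contains k =
        (n2c.contains k || ks.any (fun c => d.getD c 0 == k)) := by
  induction ks with
  | nil => intro n2c k; simp
  | cons c ks ih =>
      intro n2c k
      simp only [List.foldl_cons, List.any_cons]
      rw [ih, contains_pvLoopA]
      by_cases h : d.getD c 0 = k <;> simp [h, BEq.comm, Bool.or_comm, Bool.or_assoc]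

-- ===== VERDICT (by name: the statement is the Claim_ definition above) =====
theorem getCardByNum_spec : Claim_equal_getCardByNum := by
  intro l n _
  unfold Spec_getCardByNum getCardByNum getCardByNum_alt
  by_cases h : (((PySem.Dict.ofList l).keys.foldl (pvLoopA (PySem.Dict.ofList l)) PySem.Dict.empty).contains n) = true
  · simp only [h, if_true]
    rw [foldA_getD]
    simp
  · simp only [h]
    rw [foldA_contains] at h
    simp only [PySem.Dict.contains_empty, Bool.false_or, List.any_eq_true, not_exists, not_and,
      Bool.not_eq_true] at h
    have : ((PySem.Dict.ofList l).keys.filter (fun c => (PySem.Dict.ofList l).getD c 0 == n)) = [] := by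
      apply List.filter_eq_nil_iff.mpr
      intro c hc
      simpa using h c hc
    rw [this]
    rfl
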